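-- pv_equiv track=rewrite | github.com/RayPals/Claro | Claro.py | find_corresponding_end
-- ===== SOURCE A (Python) =====
-- from typing import List, Dict, Tuple, Any
--
-- class ClaroError(Exception):
--     """Base error class for Claro interpreter"""
--     def __init__(self, message, line_number):
--         self.message = f"Error on line {line_number}: {message}"
--         self.line_number = line_number
--         super().__init__(self.message)
--
-- def find_corresponding_end(start_line: int, lines: List[str]) -> int:
--     """Find the corresponding END statement"""
--     nested_count = 0
--     for i in range(start_line, len(lines)):
--         words = lines[i].split()
--         if words[0].upper() in ['IF', 'WHILE', 'FUNC', 'TRY', 'FOR']: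
--             nested_count += 1
--         elif words[0].upper() == 'END':
--             if nested_count == 0:
--                 return i
--             nested_count -= 1
--     raise ClaroError("No corresponding END found", start_line)
-- ===== SOURCE B (Python) =====
-- from typing import List
--
-- class ClaroError(Exception):
--     """Base error class for Claro interpreter"""
--     def __init__(self, message, line_number):
--         self.message = f"Error on line {line_number}: {message}"
--         self.line_number = line_number
--         super().__init__(self.message)
--
-- _OPENERS = ('IF', 'WHILE', 'FUNC', 'TRY', 'FOR')
--
-- def find_corresponding_end(start_line: int, lines: List[str]) -> int:
--     """Find the corresponding END statement (recursive descent over blocks)."""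
--     def scan(i):
--         # First END at depth 0 from i: walk siblings, recurse into nested blocks.
--         while i < len(lines):
--             word = lines[i].split()[0].upper()
--             if word == 'END':
--                 return i
--             if word in _OPENERS:
--                 inner = scan(i + 1)  # matching END of the nested block
--                 if inner is None:
--                     return None
--                 i = inner + 1
--             else:
--                 i += 1
--         return None
--     res = scan(start_line)
--     if res is None:
--         raise ClaroError("No corresponding END found", start_line)
--     return res
-- ===== Notes on version B (the rewrite author's own statement) =====
-- stated objective: alternative
-- what changed: Replaces the single flat loop with a nested_count counter by recursive descent over the block structure: a scanner walks sibling statements and recursively skips each nested block past its own END, so no depth counter exists.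
import Mathlib
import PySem

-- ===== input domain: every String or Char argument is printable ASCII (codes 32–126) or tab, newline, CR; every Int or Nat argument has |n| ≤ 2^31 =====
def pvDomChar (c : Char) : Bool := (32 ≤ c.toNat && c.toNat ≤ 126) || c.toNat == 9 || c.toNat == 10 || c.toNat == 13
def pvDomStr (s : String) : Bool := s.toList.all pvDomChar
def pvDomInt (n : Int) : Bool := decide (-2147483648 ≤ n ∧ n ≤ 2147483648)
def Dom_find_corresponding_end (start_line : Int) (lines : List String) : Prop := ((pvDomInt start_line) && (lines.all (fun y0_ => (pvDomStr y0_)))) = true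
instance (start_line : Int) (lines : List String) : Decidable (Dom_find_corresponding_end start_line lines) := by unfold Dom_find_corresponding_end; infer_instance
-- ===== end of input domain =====

-- B replaces A's flat loop + nesting counter by recursive descent over the block structure
-- (equivalence is about the RETURN value; on inputs where the Python raises, both ports return -1, outside Pre_).

-- ===== PORT A =====
-- the for-loop over range(start_line, len(lines)) with the nested_count accumulator;
-- -1 stands for the raise paths (IndexError on a blank line, ClaroError at the end), excluded by Pre_
def pvLoopA (lines : List String) (nested : Int) (i : Int) : Int :=
  if _h : i < (lines.length : Int) then
    match PySem.List.pyGet? lines i with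
    | none => -1                     -- lines[i] IndexError
    | some line =>
      match PySem.Str.split₀ line with
      | [] => -1                     -- words[0] IndexError
      | w :: _ =>
        if PySem.Str.upper w ∈ ["IF", "WHILE", "FUNC", "TRY", "FOR"] then
          pvLoopA lines (nested + 1) (i + 1)
        else if PySem.Str.upper w = "END" then
          if nested = 0 then i else pvLoopA lines (nested - 1) (i + 1)
        else pvLoopA lines nested (i + 1)
  else -1                            -- loop ends: raise ClaroError
termination_by ((lines.length : Int) - i).toNat
decreasing_by all_goals omega

def find_corresponding_end (start_line : Int) (lines : List String) : Int :=
  pvLoopA lines 0 start_line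

-- ===== PORT B =====
-- Source B's scan(i): walk siblings; on an opener recurse to find the nested block's END and
-- continue just past it; 'none' = no value (the Python raises). The subtype carries the
-- bounds i ≤ j < len needed for termination of the 'i = inner + 1' continuation.
def pvScanB (lines : List String) (i : Int) :
    Option {j : Int // i ≤ j ∧ j < (lines.length : Int)} :=
  if h : i < (lines.length : Int) then
    match PySem.List.pyGet? lines i with
    | none => none                   -- lines[i] IndexError
    | some line =>
      match PySem.Str.split₀ line with
      | [] => none                   -- words[0] IndexError
      | w :: _ =>
        if PySem.Str.upper w = "END" then some ⟨i, le_refl i, h⟩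
        else if PySem.Str.upper w ∈ ["IF", "WHILE", "FUNC", "TRY", "FOR"] then
          match pvScanB lines (i + 1) with
          | none => none
          | some ⟨j, hj⟩ =>
            match pvScanB lines (j + 1) with
            | none => none
            | some ⟨k, hk⟩ => some ⟨k, by omega, hk.2⟩
        else
          match pvScanB lines (i + 1) with
          | none => none
          | some ⟨j, hj⟩ => some ⟨j, by omega, hj.2⟩
  else none
termination_by ((lines.length : Int) - i).toNat
decreasing_by all_goals omega

def find_corresponding_end_alt (start_line : Int) (lines : List String) : Int :=
  match pvScanB lines start_line with
  | none => -1                       -- raise ClaroError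
  | some j => j.val

-- ===== PRECONDITION & SPEC =====
-- first word (uppercased) of lines[i], Python indexing; none = the line would raise IndexError
def pvHeadU (lines : List String) (i : Int) : Option String :=
  (PySem.List.pyGet? lines i).bind (fun s => ((PySem.Str.split₀ s).head?).map PySem.Str.upper)

def pvIsEndAt (lines : List String) (i : Int) : Bool := pvHeadU lines i == some "END"

def pvIsOpenAt (lines : List String) (i : Int) : Bool :=
  match pvHeadU lines i with
  | some u => ["IF", "WHILE", "FUNC", "TRY", "FOR"].contains u
  | none => false

-- exactly the inputs on which the Python A returns: some scanned prefix ends in an END line,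
-- every line of that prefix has a first word, and the prefix holds more ENDs than openers
-- (i.e. an END at nesting depth 0 is reached before any blank line); the bound -len ≤ start_line
-- holds whenever A returns (lines[start_line] was read) and keeps the ranges small to evaluate
def Pre_find_corresponding_end (start_line : Int) (lines : List String) : Prop :=
  -(lines.length : Int) ≤ start_line ∧
  ∃ j ∈ PySem.List.pyRange start_line lines.length 1,
    pvIsEndAt lines j = true ∧
    (∀ i ∈ PySem.List.pyRange start_line (j + 1) 1, (pvHeadU lines i).isSome = true) ∧
    (PySem.List.pyRange start_line (j + 1) 1).countP (pvIsEndAt lines) >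
      (PySem.List.pyRange start_line (j + 1) 1).countP (pvIsOpenAt lines)

instance (start_line : Int) (lines : List String) : Decidable (Pre_find_corresponding_end start_line lines) := by
  unfold Pre_find_corresponding_end; infer_instance

def pvWitness_find_corresponding_end : Int × List String := (0, ["IF x", "END", "END"])

def Spec_find_corresponding_end (start_line : Int) (lines : List String) (out : Int) : Prop := out = find_corresponding_end_alt start_line lines
instance (start_line : Int) (lines : List String) (out : Int) : Decidable (Spec_find_corresponding_end start_line lines out) := by unfold Spec_find_corresponding_end; infer_instance

-- ===== CLAIM (what is proved, stated in full; the proofs are below) =====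
def Claim_equal_find_corresponding_end : Prop := ∀ (start_line : Int) (lines : List String), Dom_find_corresponding_end start_line lines → Pre_find_corresponding_end start_line lines → Spec_find_corresponding_end start_line lines (find_corresponding_end start_line lines)

-- ===== LEMMAS AND PROOFS =====

-- the loop/descent bridge: A's loop with counter `nested` from index i returns B's first
-- depth-0 END if nested = 0, and otherwise treats it as closing one open block
theorem pvLoopA_eq_scan (lines : List String) (i nested : Int) (hn : 0 ≤ nested) :
    pvLoopA lines nested i =
      match pvScanB lines i with
      | none => -1
      | some j => if nested = 0 then j.val else pvLoopA lines (nested - 1) (j.val + 1) := by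
  rw [pvLoopA.eq_def, pvScanB.eq_def]
  by_cases h : i < (lines.length : Int)
  · simp only [dif_pos h]
    cases hg : PySem.List.pyGet? lines i with
    | none => rfl
    | some line =>
      cases hs : PySem.Str.split₀ line with
      | nil => simp only [hs]
      | cons w ws =>
        simp only [hs]
        by_cases he : PySem.Str.upper w = "END"
        · have hno : PySem.Str.upper w ∉ ["IF", "WHILE", "FUNC", "TRY", "FOR"] := by
            rw [he]; decide
          simp only [if_pos he, if_neg hno]
        · by_cases ho : PySem.Str.upper w ∈ ["IF", "WHILE", "FUNC", "TRY", "FOR"]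
          · simp only [if_pos ho, if_neg he]
            rw [pvLoopA_eq_scan lines (i + 1) (nested + 1) (by omega)]
            cases h1 : pvScanB lines (i + 1) with
            | none => rfl
            | some j =>
              obtain ⟨jv, hj⟩ := j
              simp only [if_neg (show ¬nested + 1 = 0 by omega), add_sub_cancel_right]
              rw [pvLoopA_eq_scan lines (jv + 1) nested hn]
              cases h2 : pvScanB lines (jv + 1) with
              | none => rfl
              | some k => obtain ⟨kv, hk⟩ := k; rfl
          · simp only [if_neg ho, if_neg he]
            rw [pvLoopA_eq_scan lines (i + 1) nested hn]
            cases h1 : pvScanB lines (i + 1) with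
            | none => rfl
            | some j => obtain ⟨jv, hj⟩ := j; rfl
  · simp only [dif_neg h]
termination_by ((lines.length : Int) - i).toNat
decreasing_by all_goals omega

-- ===== VERDICT (by name: the statement is the Claim_ definition above) =====
theorem find_corresponding_end_spec : Claim_equal_find_corresponding_end := by
  intro start_line lines _ _
  unfold Spec_find_corresponding_end find_corresponding_end find_corresponding_end_alt
  rw [pvLoopA_eq_scan lines start_line 0 le_rfl]
  cases pvScanB lines start_line with
  | none => rfl
  | some j => simp
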